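-- pv_equiv track=rewrite | github.com/paiml/depyler | examples/hard_final_db_queryplan.py | compare_plans
-- ===== SOURCE A (Python) =====
-- def compare_plans(costs: list[int]) -> int:
--     """Find index of plan with minimum cost."""
--     if len(costs) == 0:
--         return 0 - 1
--     best_idx: int = 0
--     best_c: int = costs[0]
--     i: int = 1
--     while i < len(costs):
--         cv: int = costs[i]
--         if cv < best_c:
--             best_c = cv
--             best_idx = i
--         i = i + 1
--     return best_idx
-- ===== SOURCE B (Python) =====
-- def compare_plans(costs: list[int]) -> int:
--     """Find index of plan with minimum cost."""
--     if not costs: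
--         return -1
--     order = sorted(range(len(costs)), key=lambda i: costs[i])
--     return order[0]
-- ===== Notes on version B (the rewrite author's own statement) =====
-- stated objective: alternative
-- what changed: Replaces A's fused best-so-far while-loop with a sort-based selection: stably sort the index list by cost and take the first index (stability reproduces the first-occurrence-of-minimum tie behaviour of A's strict '<').
import Mathlib
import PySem

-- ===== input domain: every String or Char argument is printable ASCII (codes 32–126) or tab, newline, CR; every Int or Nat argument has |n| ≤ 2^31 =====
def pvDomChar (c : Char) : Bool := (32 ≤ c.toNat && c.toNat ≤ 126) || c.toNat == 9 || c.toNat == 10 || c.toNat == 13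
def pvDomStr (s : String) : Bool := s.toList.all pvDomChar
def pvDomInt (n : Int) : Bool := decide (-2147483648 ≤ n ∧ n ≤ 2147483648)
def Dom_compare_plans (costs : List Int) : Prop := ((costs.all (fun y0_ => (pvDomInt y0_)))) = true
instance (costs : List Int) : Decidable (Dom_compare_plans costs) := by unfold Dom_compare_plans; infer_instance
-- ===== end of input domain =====

-- B replaces A's fused best-so-far while-loop with a stable sort of the index list by cost, returning the first sorted index; genuinely different algorithm, no speed claim.


-- ===== PORT A =====
-- while i < len(costs): update (best_idx, best_c) on cv < best_c — the loop is the fold over pyRange 1 len 1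
def compare_plans (costs : List Int) : Int :=
  if costs.length = 0 then 0 - 1
  else
    let st :=
      (PySem.List.pyRange 1 (costs.length : Int) 1).foldl
        (fun (st : Int × Int) i =>
          let cv := PySem.List.pyGetD costs i 0
          if cv < st.2 then (i, cv) else st)
        (0, PySem.List.pyGetD costs 0 0)
    st.1

-- ===== PORT B =====
-- if not costs: return -1; order = sorted(range(len(costs)), key=lambda i: costs[i]); return order[0]
-- the `.headD 0` default is unreachable: sorting a nonempty index list is nonempty
def compare_plans_alt (costs : List Int) : Int :=
  if costs = [] then -1
  else
    let order := PySem.List.sorted (PySem.List.pyRange 0 (costs.length : Int) 1)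
      (fun i => PySem.List.pyGetD costs i 0)
    order.headD 0

-- ===== PRECONDITION & SPEC =====
def Spec_compare_plans (costs : List Int) (out : Int) : Prop := out = compare_plans_alt costs
instance (costs : List Int) (out : Int) : Decidable (Spec_compare_plans costs out) := by unfold Spec_compare_plans; infer_instance

-- ===== CLAIM (what is proved, stated in full; the proofs are below) =====
def Claim_equal_compare_plans : Prop := ∀ (costs : List Int), Dom_compare_plans costs → Spec_compare_plans costs (compare_plans costs)

-- ===== LEMMAS AND PROOFS =====

-- A's paired fold projects to a plain best-index fold (invariant: second component = key of first)
theorem pairfold_fst (g : Int → Int) (l : List Int) : ∀ (bi : Int),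
    (l.foldl (fun (st : Int × Int) i =>
        let cv := g i
        if cv < st.2 then (i, cv) else st) (bi, g bi)).1
      = l.foldl (fun h i => if g i < g h then i else h) bi := by
  induction l with
  | nil => intro bi; rfl
  | cons x t ih =>
    intro bi
    by_cases hx : g x < g bi
    · simp only [List.foldl_cons, if_pos hx]
      exact ih x
    · simp only [List.foldl_cons, if_neg hx]
      exact ih bi

-- inserting into a nonempty list: the new head is the smaller-keyed of x and the old head
theorem insertBy_cons (g : Int → Int) (x h : Int) (t : List Int) :
    PySem.List.insertBy (fun a b => decide (g a < g b)) x (h :: t)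
      = if g x < g h then x :: h :: t
        else h :: PySem.List.insertBy (fun a b => decide (g a < g b)) x t := by
  by_cases hx : g x < g h <;> simp [PySem.List.insertBy, hx]

-- head of the insertion-sort fold over a nonempty accumulator = the best-index fold
theorem foldhead (g : Int → Int) (l : List Int) : ∀ (h : Int) (t : List Int),
    ((l.foldl (fun acc x => PySem.List.insertBy (fun a b => decide (g a < g b)) x acc) (h :: t))).headD 0
      = l.foldl (fun a i => if g i < g a then i else a) h := by
  induction l with
  | nil => intro h t; rfl
  | cons x l ih =>
    intro h t
    rw [List.foldl_cons, List.foldl_cons, insertBy_cons]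
    by_cases hx : g x < g h
    · rw [if_pos hx, if_pos hx]; exact ih x (h :: t)
    · rw [if_neg hx, if_neg hx]; exact ih h _

-- ===== VERDICT (by name: the statement is the Claim_ definition above) =====
theorem compare_plans_spec : Claim_equal_compare_plans := by
  intro costs _
  unfold Spec_compare_plans compare_plans compare_plans_alt
  cases costs with
  | nil => decide
  | cons c cs =>
    rw [if_neg (show ¬ (c :: cs).length = 0 by simp), if_neg (show ¬ (c :: cs) = [] by simp)]
    set g : Int → Int := fun i => PySem.List.pyGetD (c :: cs) i 0 with hg
    have hrange : PySem.List.pyRange 0 ((c :: cs).length : Int) 1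
        = 0 :: PySem.List.pyRange 1 ((c :: cs).length : Int) 1 := by
      have := PySem.List.pyRange_one_cons (a := 0) (b := ((c :: cs).length : Int)) (by simp)
      simpa using this
    have hB : (PySem.List.sorted (PySem.List.pyRange 0 ((c :: cs).length : Int) 1) g).headD 0
        = (PySem.List.pyRange 1 ((c :: cs).length : Int) 1).foldl
            (fun a i => if g i < g a then i else a) 0 := by
      rw [PySem.List.sorted_eq_foldl_insertBy, hrange, List.foldl_cons]
      have h0 : PySem.List.insertBy (fun a b => decide (g a < g b)) 0 ([] : List Int) = [0] := by
        simp [PySem.List.insertBy]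
      rw [h0]
      exact foldhead g _ 0 []
    have hg0 : PySem.List.pyGetD (c :: cs) 0 0 = g 0 := rfl
    simp only [hB, hg0]
    exact pairfold_fst g _ 0
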